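-- pv_equiv track=rewrite | github.com/Waseem0718/Python_programs | Strings/mathematical_expession.py | mathematicalexpression
-- ===== SOURCE A (Python) =====
-- def mathematicalexpression(s):
--     stack = []
--     operators = {"+-/*"}
--     previous_char = ""
--     for ch in s:
--         if ch == '(':
--             stack.append(ch)
--         elif ch == ')':
--             if not stack or stack[-1]!='(':
--                 return "Invalid"
--             stack.pop()
--
--         elif ch.isalnum():
--             previous_char = ch
--         elif ch in operators:
--             if previous_char is None or previous_char in operators or previous_char=='(':
--                 return "Invalid"
--             previous_char = ch
--         else:
--             return "Invalid"
--
--     if stack: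
--         return "Invalid"
--
--     if previous_char in operators:
--         return "Invalid"
--
--     return "Valid"
-- ===== SOURCE B (Python) =====
-- def mathematicalexpression(s):
--     # Pass 1: reject any character that is not alphanumeric and not a parenthesis.
--     # (In A the operator set is {"+-/*"} -- a set holding ONE 4-char string -- so single
--     # operator characters are never members and fall to the else branch: they are invalid.)
--     for c in s:
--         if not (c.isalnum() or c == '(' or c == ')'):
--             return "Invalid"
--     # Pass 2: balance check with a depth counter instead of a stack.
--     depth = 0
--     for c in s:
--         if c == '(':
--             depth += 1
--         elif c == ')':
--             depth -= 1
--             if depth < 0: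
--                 return "Invalid"
--     return "Valid" if depth == 0 else "Invalid"
-- ===== Notes on version B (the rewrite author's own statement) =====
-- stated objective: simpler
-- what changed: Replaces A's single stateful loop (explicit stack list, previous_char tracking, dead operator-set logic) with two plain passes: a character-whitelist scan, then an integer depth counter for parenthesis balance.
import Mathlib
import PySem

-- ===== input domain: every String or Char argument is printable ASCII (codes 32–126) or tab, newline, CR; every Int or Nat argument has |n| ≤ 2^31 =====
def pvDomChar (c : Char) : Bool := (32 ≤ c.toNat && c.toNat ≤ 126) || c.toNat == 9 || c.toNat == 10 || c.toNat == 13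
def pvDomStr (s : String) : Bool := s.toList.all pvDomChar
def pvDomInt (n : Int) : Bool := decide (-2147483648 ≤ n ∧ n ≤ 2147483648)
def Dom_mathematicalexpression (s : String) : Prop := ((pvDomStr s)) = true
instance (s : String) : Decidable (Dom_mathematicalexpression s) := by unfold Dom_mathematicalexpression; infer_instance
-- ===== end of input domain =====

-- B replaces A's single stateful loop (stack list + previous_char + dead operator set) with
-- two plain passes: a whitelist scan, then an integer depth counter. Same values everywhere.

-- ===== PORT A =====
-- operators = {"+-/*"}: a Python set containing ONE 4-character string
def pvOpsA : PySem.Set String := PySem.Set.ofList ["+-/*"]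

-- the loop of A: state = (stack, previous_char); early returns become result values
def pvGoA : List Char → List Char → String → String
  | [], stack, prev =>
      if stack ≠ [] then "Invalid"
      else if pvOpsA.contains prev then "Invalid"
      else "Valid"
  | ch :: rest, stack, prev =>
      if ch == '(' then pvGoA rest (stack ++ [ch]) prev
      else if ch == ')' then
        if stack.isEmpty || PySem.List.pyGet? stack (-1) != some '(' then "Invalid"
        else pvGoA rest stack.dropLast prev          -- stack.pop(): drop last (stack nonempty here)
      else if PySem.Chars.isalnum ch then pvGoA rest stack (String.singleton ch)
      else if pvOpsA.contains (String.singleton ch) then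
        -- 'previous_char is None' is always False (previous_char is a str); omitted
        if pvOpsA.contains prev || prev == "(" then "Invalid"
        else pvGoA rest stack (String.singleton ch)
      else "Invalid"

def mathematicalexpression (s : String) : String := pvGoA s.toList [] ""

-- ===== PORT B =====
-- pass 2 of B: depth counter; none = early "Invalid" (depth went negative)
def pvGoB : List Char → Int → Option Int
  | [], d => some d
  | c :: rest, d =>
      if c == '(' then pvGoB rest (d + 1)
      else if c == ')' then
        if d - 1 < 0 then none else pvGoB rest (d - 1)
      else pvGoB rest d

def mathematicalexpression_alt (s : String) : String :=
  if s.toList.any (fun c => !(PySem.Chars.isalnum c || c == '(' || c == ')')) then "Invalid"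
  else
    match pvGoB s.toList 0 with
    | none => "Invalid"
    | some d => if d == 0 then "Valid" else "Invalid"

-- ===== PRECONDITION & SPEC =====
def Spec_mathematicalexpression (s : String) (out : String) : Prop := out = mathematicalexpression_alt s
instance (s : String) (out : String) : Decidable (Spec_mathematicalexpression s out) := by unfold Spec_mathematicalexpression; infer_instance

-- ===== CLAIM (what is proved, stated in full; the proofs are below) =====
def Claim_equal_mathematicalexpression : Prop := ∀ (s : String), Dom_mathematicalexpression s → Spec_mathematicalexpression s (mathematicalexpression s)

-- ===== LEMMAS AND PROOFS =====

-- ===== VERDICT (by name: the statement is the Claim_ definition above) =====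
-- a character-long string is never the 4-character string "+-/*"
theorem pvOpsA_contains_singleton (c : Char) : pvOpsA.contains (String.singleton c) = false := by
  simp [pvOpsA, PySem.Set.contains, PySem.Set.ofList, String.singleton]
  intro h
  have := congrArg String.length h
  simp [String.length] at this

theorem pvOpsA_notmem_singleton (c : Char) : String.singleton c ∉ pvOpsA := by
  have := pvOpsA_contains_singleton c
  simp [PySem.Set.contains] at this
  exact this

theorem pvOpsA_contains_empty : pvOpsA.contains "" = false := by decide

-- B's whitelist predicate and the reading of pass 2's outcome
def pvGood (c : Char) : Bool := PySem.Chars.isalnum c || c == '(' || c == ')'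

def pvInterp : Option Int → String
  | none => "Invalid"
  | some d => if d == 0 then "Valid" else "Invalid"

-- loop invariant: A's stack is always a pile of '(' of height n, and its result is
-- "Invalid" if a non-whitelisted char remains, else B's depth-counter verdict
theorem pvGoA_eq (cs : List Char) : ∀ (n : Nat) (prev : String),
    pvOpsA.contains prev = false →
    pvGoA cs (List.replicate n '(') prev =
      (if cs.all pvGood then pvInterp (pvGoB cs (n : Int)) else "Invalid") := by
  induction cs with
  | nil =>
    intro n prev hp
    have hp' : prev ∉ pvOpsA := by simp [PySem.Set.contains] at hp; exact hp
    cases n with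
    | zero => simp [pvGoA, pvGoB, pvInterp, hp']
    | succ m => simp [pvGoA, pvGoB, pvInterp]; omega
  | cons c rest ih =>
    intro n prev hp
    by_cases h1 : c = '('
    · subst h1
      have : List.replicate n '(' ++ ['('] = List.replicate (n + 1) '(' := by
        simp [List.replicate_succ']
      simp only [pvGoA, pvGoB, beq_self_eq_true, if_pos, this]
      rw [ih (n + 1) prev hp]
      simp [pvGood, List.all_cons]
    · by_cases h2 : c = ')'
      · subst h2
        cases n with
        | zero =>
          simp [pvGoA, pvGoB, pvGood, pvInterp, List.all_cons]
        | succ m =>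
          rw [show (List.replicate (m + 1) '(') = List.replicate m '(' ++ ['('] from by
            simp [List.replicate_succ']]
          simp only [pvGoA, pvGoB]
          rw [PySem.List.pyGet?_neg_one]
          simp only [List.getLast?_concat, List.dropLast_concat]
          rw [ih m prev hp]
          push_cast
          have hc : ((m : Int) + 1) - 1 = (m : Int) := by ring
          simp [pvGood, hc, List.all_cons]
          have hm : ¬((m : Int) < 0) := by omega
          simp [hm]
      · by_cases h3 : PySem.Chars.isalnum c = true
        · simp only [pvGoA, pvGoB, h3, beq_iff_eq, h1, h2, if_pos]
          rw [ih n (String.singleton c) (pvOpsA_contains_singleton c)]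
          simp [pvGood, h3, List.all_cons]
        · simp [pvGoA, pvGood, h1, h2, h3, List.all_cons,
                pvOpsA_notmem_singleton c]

theorem mathematicalexpression_spec : Claim_equal_mathematicalexpression := by
  intro s _
  unfold Spec_mathematicalexpression mathematicalexpression mathematicalexpression_alt
  have h := pvGoA_eq s.toList 0 "" pvOpsA_contains_empty
  simp only [List.replicate_zero, Nat.cast_zero] at h
  rw [h]
  have hrel : (s.toList.any fun c => !(PySem.Chars.isalnum c || c == '(' || c == ')'))
      = !s.toList.all pvGood := by
    simp only [pvGood, List.all_eq_not_any_not, Bool.not_not]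
  rw [hrel]
  by_cases hall : s.toList.all pvGood
  · simp only [hall, Bool.not_true, if_pos, if_neg, Bool.false_eq_true, not_false_iff]
    cases pvGoB s.toList 0 <;> simp [pvInterp]
  · simp [hall]
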